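/-
  GENERATED by c/gen_labels.py from the tables of c/ (FUNCTIONS LOOPS CHECKS insns sym, image f) and design/units.tsv
  -- do not edit; re-run the script when the image is rebuilt.

  `Vorbis.L.<function>.at_<hex address>`: cut points added by a SPLIT of a proof unit (the table AT of c/gen_labels.py). The name is the address: no label is ever renumbered, and Vorbis/Labels.lean does not change.
  Statements and proofs cite these names, never the numbers: a rebuild that only shifts code changes this file alone.
  Per function: entry, size (bytes), insns (instructions), cut<k> (the addresses design/units.tsv cites: segment
  entries, exits, cut points), loop<k> (loop heads), ret<k> (the return address of the k-th call), chk<k> (the call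
  instruction of the k-th check site). One address may have several names.
-/
import Vorbis.Labels
namespace Vorbis.L
open X86

abbrev decode_all.at_10351d : Word := 0x10351d  -- split cut: mov QWORD PTR [r13+0xc00000],0x0 | shim.c:55 long cap, char *arena, int arena_len) {
abbrev decode_all.at_103640 : Word := 0x103640  -- split cut: mov r13,QWORD PTR [rsp+0x28] | shim.c:93 error = stb_vorbis_get_error(v);

abbrev vorbis_finish_frame.at_1071ae : Word := 0x1071ae  -- split cut: mov eax,DWORD PTR [rbx+0x4e8] | stb_vorbis_fixed.c:3507 prev = f->previous_l…
abbrev vorbis_finish_frame.at_107257 : Word := 0x107257  -- split cut: cmp DWORD PTR [rsp+0x10],0x0 | stb_vorbis_fixed.c:3522 if (!prev)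

abbrev codebook_decode_deinterleave_repeat.at_10dc5c : Word := 0x10dc5c  -- split cut: mov rbx,QWORD PTR [rsp+0x18] | stb_vorbis_fixed.c:1908 if (!…
abbrev codebook_decode_deinterleave_repeat.at_10de32 : Word := 0x10de32  -- split cut: mov r13,QWORD PTR [rsp+0x18] | stb_vorbis_fixed.c:1903 DECOD…
abbrev codebook_decode_deinterleave_repeat.at_10decf : Word := 0x10decf  -- split cut: test r14d,r14d | stb_vorbis_fixed.c:1907 if (z < 0) {

abbrev decode_residue.at_10f141 : Word := 0x10f141  -- split cut: mov r12,QWORD PTR [rbp-0xb0] | stb_vorbis_fixed.c:2192 Codebook *book = f->codebo…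
abbrev decode_residue.at_10f1cf : Word := 0x10f1cf  -- split cut: mov rdi,r14 | stb_vorbis_fixed.c:2184 int z = r->begin + pcount*r->part_size;
abbrev decode_residue.at_10f260 : Word := 0x10f260  -- split cut: test bx,0x8000 | stb_vorbis_fixed.c:2191 if (b >= 0) {
abbrev decode_residue.at_10f4ed : Word := 0x10f4ed  -- split cut: mov r14,QWORD PTR [rbp-0xb0] | stb_vorbis_fixed.c:2238 Codebook *book = f->codebo…
abbrev decode_residue.at_10f579 : Word := 0x10f579  -- split cut: mov rdi,r12 | stb_vorbis_fixed.c:2230 int z = r->begin + pcount*r->part_size;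

abbrev vorbis_decode_packet_rest.at_110bda : Word := 0x110bda  -- split cut: mov rdi,rdx | stb_vorbis_fixed.c:3217 n = f->blocksize[m->blockflag];
abbrev vorbis_decode_packet_rest.at_110cad : Word := 0x110cad  -- split cut: lea rdi,[rbx+0x1b] | stb_vorbis_fixed.c:3258 DECODE(temp,f,c);
abbrev vorbis_decode_packet_rest.at_110ce2 : Word := 0x110ce2  -- split cut: mov eax,DWORD PTR [rsp+0x8] | stb_vorbis_fixed.c:3259 finalY[offset++]…
abbrev vorbis_decode_packet_rest.at_110d5c : Word := 0x110d5c  -- split cut: lea rdi,[rbp+0xa8] | stb_vorbis_fixed.c:3257 Codebook *c = f->codebook…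
abbrev vorbis_decode_packet_rest.at_110d93 : Word := 0x110d93  -- split cut: lea rdi,[rbp+0x6e4] | stb_vorbis_fixed.c:3258 DECODE(temp,f,c);
abbrev vorbis_decode_packet_rest.at_110f3b : Word := 0x110f3b  -- split cut: lea rdi,[rbp+0x6e4] | stb_vorbis_fixed.c:3250 DECODE(cval,f,c);
abbrev vorbis_decode_packet_rest.at_110fc2 : Word := 0x110fc2  -- split cut: lea rdi,[r13+0x1b] | stb_vorbis_fixed.c:3250 DECODE(cval,f,c);

abbrev vorbis_decode_initial.at_1131fa : Word := 0x1131fa  -- split cut: lea rdi,[rbx+0x1e0] | stb_vorbis_fixed.c:3172 i = get_bits(f, ilog(f->mode…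
abbrev vorbis_decode_initial.at_113282 : Word := 0x113282  -- split cut: mov eax,r15d | stb_vorbis_fixed.c:3188 window_center = n >> 1;
abbrev vorbis_decode_initial.at_113337 : Word := 0x113337  -- split cut: cmp BYTE PTR [r14],0x0 | stb_vorbis_fixed.c:3196 if (m->blockflag && !next…
abbrev vorbis_decode_initial.at_1133c3 : Word := 0x1133c3  -- split cut: add rsp,0x28 | stb_vorbis_fixed.c:3205 }

abbrev start_decoder.at_113b15 : Word := 0x113b15  -- split cut: mov esi,0x22 | stb_vorbis_fixed.c:3636 return error(f, VORBIS_invalid_first_page);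
abbrev start_decoder.at_113b7a : Word := 0x113b7a  -- split cut: mov esi,0x22 | stb_vorbis_fixed.c:3618 if (!(f->page_flag & PAGEFLAG_first_page))…
abbrev start_decoder.at_113b89 : Word := 0x113b89  -- split cut: mov esi,0x22 | stb_vorbis_fixed.c:3619 if (f->page_flag & PAGEFLAG_last_page) retu…
abbrev start_decoder.at_113b98 : Word := 0x113b98  -- split cut: mov esi,0x22 | stb_vorbis_fixed.c:3620 if (f->page_flag & PAGEFLAG_continued_packe…
abbrev start_decoder.at_113baa : Word := 0x113baa  -- split cut: mov esi,0x22 | stb_vorbis_fixed.c:3622 if (f->segment_count != 1) return error(f,…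
abbrev start_decoder.at_113bdc : Word := 0x113bdc  -- split cut: mov esi,0x26 | stb_vorbis_fixed.c:3634 get8(f) == '\0') return error(f, VORBIS_ogg…
abbrev start_decoder.at_113bfa : Word := 0x113bfa  -- split cut: mov esi,0x22 | stb_vorbis_fixed.c:3641 if (get8(f) != VORBIS_packet_id) return err…
abbrev start_decoder.at_114590 : Word := 0x114590  -- split cut: mov ebp,DWORD PTR [rsp+0x24] | stb_vorbis_fixed.c:3749 int total=0;
abbrev start_decoder.at_114710 : Word := 0x114710  -- split cut: lea rdi,[r14+0x1b] | stb_vorbis_fixed.c:3864 if (c->sparse) {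
abbrev start_decoder.at_1149ba : Word := 0x1149ba  -- split cut: mov rbp,QWORD PTR [rsp+0x18] | stb_vorbis_fixed.c:3847 if (c->sparse) setup_temp_f…
abbrev start_decoder.at_114c6f : Word := 0x114c6f  -- split cut: lea rdi,[r14+0x1c] | stb_vorbis_fixed.c:3889 if (c->lookup_values == 0) return err…
abbrev start_decoder.at_1162f9 : Word := 0x1162f9  -- split cut: mov esi,0x14 | stb_vorbis_fixed.c:4113 if (m->chan[k].magnitude >= f->channels) re…
abbrev start_decoder.at_116323 : Word := 0x116323  -- split cut: mov esi,0x14 | stb_vorbis_fixed.c:4114 if (m->chan[k].angle >= f->channels) return…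
abbrev start_decoder.at_11633b : Word := 0x11633b  -- split cut: mov esi,0x14 | stb_vorbis_fixed.c:4115 if (m->chan[k].magnitude == m->chan[k].angl…
abbrev start_decoder.at_1165f4 : Word := 0x1165f4  -- split cut: mov esi,0x14 | stb_vorbis_fixed.c:4149 if (m->windowtype != 0) return error(f, VOR…
abbrev start_decoder.at_116616 : Word := 0x116616  -- split cut: mov esi,0x14 | stb_vorbis_fixed.c:4150 if (m->transformtype != 0) return error(f,…
abbrev start_decoder.at_116641 : Word := 0x116641  -- split cut: mov esi,0x14 | stb_vorbis_fixed.c:4151 if (m->mapping >= f->mapping_count) return…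

abbrev stb_vorbis_get_frame_float.at_119769 : Word := 0x119769  -- split cut: mov QWORD PTR [r14+0xc00000],0x0 | stb_vorbis_fixed.c:5056 {
abbrev stb_vorbis_get_frame_float.at_119806 : Word := 0x119806  -- split cut: mov r12d,DWORD PTR [rsp+0x60] | stb_vorbis_fixed.c:5069 f->channel_bu…

end Vorbis.L
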